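-- pv_equiv track=rewrite | github.com/payal15604/Codeforces | 800/Line Breaks.py | line_breaks
-- ===== SOURCE A (Python) =====
-- def line_breaks(t, test_cases):
--     results = []
--     for test in test_cases:
--         n, m, words = test
--         total_length = 0
--         count = 0
--         for word in words:
--             if total_length + len(word) > m:
--                 break
--             total_length += len(word)
--             count += 1
--         results.append(count)
--     return results
-- ===== SOURCE B (Python) =====
-- def _fit(m, words):
--     # prefix[i] = total length of the first i words; monotone nondecreasing
--     prefix = [0]
--     for w in words:
--         prefix.append(prefix[-1] + len(w))
--     # binary search for the largest i with prefix[i] <= m (0 if none, i.e. m < 0)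
--     lo, hi, ans = 0, len(prefix) - 1, 0
--     while lo <= hi:
--         mid = (lo + hi) // 2
--         if prefix[mid] <= m:
--             ans = mid
--             lo = mid + 1
--         else:
--             hi = mid - 1
--     return ans
--
-- def line_breaks(t, test_cases):
--     return [_fit(m, words) for n, m, words in test_cases]
-- ===== Notes on version B (the rewrite author's own statement) =====
-- stated objective: alternative
-- what changed: Replaces A's early-terminating greedy scan per test by building a prefix-sum table of word lengths and binary-searching it for the largest prefix <= m; outer loop becomes a comprehension over a helper.
import Mathlib
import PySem

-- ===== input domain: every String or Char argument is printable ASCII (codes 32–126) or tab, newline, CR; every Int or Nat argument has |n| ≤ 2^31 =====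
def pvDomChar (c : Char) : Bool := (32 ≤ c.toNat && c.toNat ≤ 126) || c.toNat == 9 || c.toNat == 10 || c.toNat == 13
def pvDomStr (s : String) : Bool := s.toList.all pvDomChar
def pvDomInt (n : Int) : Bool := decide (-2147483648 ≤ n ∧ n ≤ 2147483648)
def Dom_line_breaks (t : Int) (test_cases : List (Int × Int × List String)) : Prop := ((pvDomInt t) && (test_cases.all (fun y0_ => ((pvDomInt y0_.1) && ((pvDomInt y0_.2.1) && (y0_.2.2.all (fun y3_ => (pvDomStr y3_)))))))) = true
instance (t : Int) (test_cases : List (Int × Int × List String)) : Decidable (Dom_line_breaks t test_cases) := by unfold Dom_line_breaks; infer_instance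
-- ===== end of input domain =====

-- B replaces A's early-terminating greedy scan per test by a prefix-sum table of word
-- lengths plus a hand-written binary search for the largest prefix ≤ m (objective:
-- alternative algorithm; same behaviour).

-- ===== PORT A =====
-- A's inner loop: greedy scan with running total and count, break on first overflow.
def lineBreaksLoopA (m : Int) (total : Int) (count : Int) (words : List String) : Int :=
  match words with
  | [] => count
  | w :: ws =>
      if total + PySem.Str.len w > m then count
      else lineBreaksLoopA m (total + PySem.Str.len w) (count + 1) ws

def line_breaks (t : Int) (test_cases : List (Int × Int × List String)) : List Int :=
  test_cases.foldl (fun results test => results ++ [lineBreaksLoopA test.2.1 0 0 test.2.2]) []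

-- ===== PORT B =====
-- Source B's while loop: binary search over the prefix table for the largest index with
-- prefix[i] ≤ m (prefix[mid] is in range whenever it is read, so pyGetD is exact here).
def lineBreaksBS (pre : List Int) (m : Int) (lo : Int) (hi : Int) (ans : Int) : Int :=
  if h : lo ≤ hi then
    let mid := PySem.Int.floordiv (lo + hi) 2
    if PySem.List.pyGetD pre mid 0 ≤ m then
      lineBreaksBS pre m (mid + 1) hi mid
    else
      lineBreaksBS pre m lo (mid - 1) ans
  else ans
termination_by (hi + 1 - lo).toNat
decreasing_by
  · have := PySem.Int.floordiv_two_mid_bounds h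
    omega
  · have := PySem.Int.floordiv_two_mid_bounds h
    omega

-- Source B's _fit: build the prefix table (the pair's second component tracks prefix[-1]),
-- then binary-search it.
def lineBreaksFit (m : Int) (words : List String) : Int :=
  let st := words.foldl
    (fun (st : List Int × Int) w => (st.1 ++ [st.2 + PySem.Str.len w], st.2 + PySem.Str.len w))
    ([0], 0)
  lineBreaksBS st.1 m 0 ((st.1.length : Int) - 1) 0

def line_breaks_alt (t : Int) (test_cases : List (Int × Int × List String)) : List Int :=
  test_cases.map (fun test => lineBreaksFit test.2.1 test.2.2)

-- ===== PRECONDITION & SPEC =====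
def Spec_line_breaks (t : Int) (test_cases : List (Int × Int × List String)) (out : List Int) : Prop := out = line_breaks_alt t test_cases
instance (t : Int) (test_cases : List (Int × Int × List String)) (out : List Int) : Decidable (Spec_line_breaks t test_cases out) := by unfold Spec_line_breaks; infer_instance

-- ===== CLAIM (what is proved, stated in full; the proofs are below) =====
def Claim_equal_line_breaks : Prop := ∀ (t : Int) (test_cases : List (Int × Int × List String)), Dom_line_breaks t test_cases → Spec_line_breaks t test_cases (line_breaks t test_cases)

-- ===== LEMMAS AND PROOFS =====

-- proof helper: the prefix sums of the word lengths, starting after `total` (without the leading 0)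
def lbPrefs (total : Int) : List String → List Int
  | [] => []
  | w :: ws => (total + PySem.Str.len w) :: lbPrefs (total + PySem.Str.len w) ws

-- proof helper: A's greedy count without the accumulator
def lbG (m : Int) (total : Int) : List String → Int
  | [] => 0
  | w :: ws => if total + PySem.Str.len w > m then 0 else 1 + lbG m (total + PySem.Str.len w) ws

theorem lbG_nonneg (m : Int) (ws : List String) : ∀ total, 0 ≤ lbG m total ws := by
  induction ws with
  | nil => intro total; simp [lbG]
  | cons w ws ih =>
      intro total
      simp only [lbG]
      split
      · omega
      · have := ih (total + PySem.Str.len w); omega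

theorem lbG_le (m : Int) (ws : List String) : ∀ total, lbG m total ws ≤ (ws.length : Int) := by
  induction ws with
  | nil => intro total; simp [lbG]
  | cons w ws ih =>
      intro total
      simp only [lbG, List.length_cons]
      split
      · push_cast; omega
      · have := ih (total + PySem.Str.len w); push_cast; omega

theorem loopA_eq_lbG (m : Int) (ws : List String) :
    ∀ total count, lineBreaksLoopA m total count ws = count + lbG m total ws := by
  induction ws with
  | nil => intro total count; simp [lineBreaksLoopA, lbG]
  | cons w ws ih =>
      intro total count
      simp only [lineBreaksLoopA, lbG]
      split
      · omega
      · rw [ih]; omega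

theorem lbPrefs_length (ws : List String) : ∀ total, (lbPrefs total ws).length = ws.length := by
  induction ws with
  | nil => intro total; simp [lbPrefs]
  | cons w ws ih => intro total; simp [lbPrefs, ih]

theorem lbPrefs_ge (ws : List String) : ∀ total, ∀ p ∈ lbPrefs total ws, total ≤ p := by
  induction ws with
  | nil => intro total p hp; simp [lbPrefs] at hp
  | cons w ws ih =>
      intro total p hp
      have hlen : 0 ≤ PySem.Str.len w := by simp [PySem.Str.len_eq]
      simp only [lbPrefs, List.mem_cons] at hp
      rcases hp with h | h
      · omega
      · have := ih (total + PySem.Str.len w) p h; omega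

-- threshold characterisation: the i-th prefix (0-based, without the leading 0) is ≤ m
-- exactly when the greedy count takes more than i words
theorem lbPrefs_thr (m : Int) (ws : List String) :
    ∀ total (i : Nat), i < ws.length →
      ((lbPrefs total ws).getD i 0 ≤ m ↔ (i : Int) < lbG m total ws) := by
  induction ws with
  | nil => intro total i hi; simp at hi
  | cons w ws ih =>
      intro total i hi
      have hlen : 0 ≤ PySem.Str.len w := by simp [PySem.Str.len_eq]
      cases i with
      | zero =>
          simp only [lbPrefs, lbG, List.getD_cons_zero]
          split
          · constructor
            · intro h; omega
            · intro h; omega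
          · have := lbG_nonneg m ws (total + PySem.Str.len w)
            constructor
            · intro _; push_cast; omega
            · intro _; omega
      | succ k =>
          simp only [lbPrefs, lbG, List.getD_cons_succ]
          simp only [List.length_cons] at hi
          have hk : k < ws.length := by omega
          split
          · rename_i hover
            constructor
            · intro h
              have hklt : k < (lbPrefs (total + PySem.Str.len w) ws).length := by
                rw [lbPrefs_length]; exact hk
              have hmem : (lbPrefs (total + PySem.Str.len w) ws).getD k 0 ∈
                  lbPrefs (total + PySem.Str.len w) ws := by
                rw [List.getD_eq_getElem _ _ hklt]
                exact List.getElem_mem hklt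
              have := lbPrefs_ge ws (total + PySem.Str.len w) _ hmem
              omega
            · intro h; push_cast at h; omega
          · rw [ih (total + PySem.Str.len w) k hk]
            push_cast
            omega

-- the prefix-building fold of Source B produces 0 :: lbPrefs
theorem fold_prefix (ws : List String) :
    ∀ (acc : List Int) (last : Int),
      (ws.foldl
        (fun (st : List Int × Int) w => (st.1 ++ [st.2 + PySem.Str.len w], st.2 + PySem.Str.len w))
        (acc, last)).1 = acc ++ lbPrefs last ws := by
  induction ws with
  | nil => intro acc last; simp [lbPrefs]
  | cons w ws ih =>
      intro acc last
      simp only [List.foldl_cons, lbPrefs]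
      rw [ih]
      simp

-- binary-search correctness: with the threshold hypothesis, lineBreaksBS returns max C 0
theorem bs_correct (P : List Int) (m C : Int)
    (hthr : ∀ j : Int, 0 ≤ j → j ≤ (P.length : Int) - 1 →
      (PySem.List.pyGetD P j 0 ≤ m ↔ j ≤ C)) :
    ∀ (n : Nat) (lo hi ans : Int), (hi + 1 - lo).toNat ≤ n →
      0 ≤ lo → hi ≤ (P.length : Int) - 1 → C ≤ hi → ans = max (min C (lo - 1)) 0 →
      lineBreaksBS P m lo hi ans = max C 0 := by
  intro n
  induction n with
  | zero =>
      intro lo hi ans hfuel h0 hhi hC hans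
      rw [lineBreaksBS]
      have hlh : ¬ lo ≤ hi := by omega
      rw [dif_neg hlh]
      omega
  | succ n ih =>
      intro lo hi ans hfuel h0 hhi hC hans
      rw [lineBreaksBS]
      by_cases hlh : lo ≤ hi
      · rw [dif_pos hlh]
        have hmid := PySem.Int.floordiv_two_mid_bounds hlh
        set mid := PySem.Int.floordiv (lo + hi) 2 with hmiddef
        have hthrmid := hthr mid (by omega) (by omega)
        by_cases hle : PySem.List.pyGetD P mid 0 ≤ m
        · rw [if_pos hle]
          have hmC : mid ≤ C := hthrmid.mp hle
          exact ih (mid + 1) hi mid (by omega) (by omega) hhi hC (by omega)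
        · rw [if_neg hle]
          have hmC : ¬ mid ≤ C := fun h => hle (hthrmid.mpr h)
          exact ih lo (mid - 1) ans (by omega) h0 (by omega) (by omega) hans
      · rw [dif_neg hlh]
        omega

theorem lbG_zero_of_neg (m : Int) (ws : List String) (hm : m < 0) : lbG m 0 ws = 0 := by
  cases ws with
  | nil => rfl
  | cons w ws =>
      have hlen : 0 ≤ PySem.Str.len w := by simp [PySem.Str.len_eq]
      simp only [lbG]
      rw [if_pos (by omega)]

-- per-test agreement: Source B's _fit equals A's greedy loop
theorem fit_eq_loopA (m : Int) (ws : List String) :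
    lineBreaksFit m ws = lineBreaksLoopA m 0 0 ws := by
  show lineBreaksBS (ws.foldl (fun (st : List Int × Int) w => (st.1 ++ [st.2 + PySem.Str.len w], st.2 + PySem.Str.len w)) ([0], 0)).1 m 0 (((ws.foldl (fun (st : List Int × Int) w => (st.1 ++ [st.2 + PySem.Str.len w], st.2 + PySem.Str.len w)) ([0], 0)).1.length : Int) - 1) 0 = lineBreaksLoopA m 0 0 ws
  rw [fold_prefix ws [0] 0]
  set P : List Int := [0] ++ lbPrefs 0 ws with hP
  set C : Int := if m < 0 then -1 else lbG m 0 ws with hC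
  have hg0 : 0 ≤ lbG m 0 ws := lbG_nonneg m ws 0
  have hgle : lbG m 0 ws ≤ (ws.length : Int) := lbG_le m ws 0
  have hPlen : P.length = ws.length + 1 := by
    simp [hP, lbPrefs_length]
  have hthr : ∀ j : Int, 0 ≤ j → j ≤ (P.length : Int) - 1 →
      (PySem.List.pyGetD P j 0 ≤ m ↔ j ≤ C) := by
    intro j hj0 hjn
    have hj : j = ((j.toNat : Nat) : Int) := by omega
    rw [hj, PySem.List.pyGetD_natCast]
    cases hk : j.toNat with
    | zero =>
        have : P.getD 0 0 = 0 := by simp [hP]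
        rw [this]
        simp only [hC]
        split
        · omega
        · push_cast; omega
    | succ k =>
        have hgd : P.getD (k + 1) 0 = (lbPrefs 0 ws).getD k 0 := by
          simp [hP]
        rw [hgd]
        have hkw : k < ws.length := by
          rw [hPlen] at hjn; push_cast at hjn; omega
        rw [lbPrefs_thr m ws 0 k hkw]
        simp only [hC]
        split
        · rename_i hm
          rw [lbG_zero_of_neg m ws hm]
          push_cast; omega
        · push_cast; omega
  have hbs := bs_correct P m C hthr ((P.length : Int)).toNat 0 ((P.length : Int) - 1) 0
    (by omega) (by omega) (by omega)
    (by simp only [hC]; split <;> [omega; omega])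
    (by simp only [hC]; split <;> [omega; omega])
  rw [hbs, loopA_eq_lbG m ws 0 0]
  simp only [hC]
  split
  · rename_i hm
    have := lbG_zero_of_neg m ws hm
    omega
  · omega

theorem line_breaks_eq_alt (t : Int) (test_cases : List (Int × Int × List String)) :
    line_breaks t test_cases = line_breaks_alt t test_cases := by
  unfold line_breaks line_breaks_alt
  rw [PySem.List.foldl_append_singleton_eq_map]
  apply List.map_congr_left
  intro tc _
  exact (fit_eq_loopA tc.2.1 tc.2.2).symm

-- ===== VERDICT (by name: the statement is the Claim_ definition above) =====
theorem line_breaks_spec : Claim_equal_line_breaks := by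
  intro t test_cases _
  exact line_breaks_eq_alt t test_cases
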